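-- pv_equiv track=rewrite | github.com/jiheeyy/test_correction | testcorrections.py | count_proteins
-- ===== SOURCE A (Python) =====
-- def count_proteins(proteins):
--     """Input: list of protein strings
--     Output: Dictionary with key: family name, value: # members"""
--     family_dict = {}
--     for protein in proteins:
--         family_name = protein.split(".")[0]
--         try:
--             family_dict[family_name] += 1
--         except KeyError:
--             family_dict[family_name] = 1
--     return family_dict
-- ===== SOURCE B (Python) =====
-- def count_proteins(proteins):
--     """Input: list of protein strings
--     Output: Dictionary with key: family name, value: # members"""
--     prefixes = [protein.split(".")[0] for protein in proteins]
--     family_dict = {}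
--     while prefixes:
--         family_name = prefixes[0]
--         remaining = [p for p in prefixes if p != family_name]
--         family_dict[family_name] = len(prefixes) - len(remaining)
--         prefixes = remaining
--     return family_dict
-- ===== Notes on version B (the rewrite author's own statement) =====
-- stated objective: alternative
-- what changed: Replaces A's single-pass incremental dict counting (try/except tally per element) with a repeated-partition algorithm: extract all prefixes, then repeatedly take the first remaining prefix, filter out all its occurrences, and record the count as the drop in list length; no per-element dict lookups or increments remain.
import Mathlib
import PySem

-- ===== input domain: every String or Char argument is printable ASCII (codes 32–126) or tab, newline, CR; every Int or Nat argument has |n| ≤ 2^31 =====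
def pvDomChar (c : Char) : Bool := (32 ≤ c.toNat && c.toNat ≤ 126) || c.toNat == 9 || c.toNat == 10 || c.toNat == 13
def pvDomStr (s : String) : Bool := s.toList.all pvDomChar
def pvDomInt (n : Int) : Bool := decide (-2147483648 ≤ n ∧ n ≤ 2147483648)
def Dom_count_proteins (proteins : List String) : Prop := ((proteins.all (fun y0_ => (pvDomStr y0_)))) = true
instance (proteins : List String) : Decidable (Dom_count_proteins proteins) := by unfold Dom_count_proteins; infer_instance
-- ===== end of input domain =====

-- B replaces A's incremental per-element dict tally with a repeated-partition algorithm (alternative structure, same result).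

-- ===== PORT A =====
-- protein.split(".")[0]: exact — the separator "." is nonempty so split? returns some,
-- and a split result is never the empty list, so index [0] is its head.
def pvFam (protein : String) : String := ((PySem.Str.split? protein ".").getD []).headD ""

def count_proteins (proteins : List String) : List (String × Int) :=
  (proteins.foldl (fun family_dict protein =>
      let family_name := pvFam protein
      match family_dict.get? family_name with
      | some v => family_dict.insert family_name (v + 1)   -- family_dict[family_name] += 1
      | none   => family_dict.insert family_name 1)        -- except KeyError: … = 1
    (PySem.Dict.empty : PySem.Dict String Int)).items

-- ===== PORT B =====
-- the while loop of Source B: repeatedly partition the remaining prefixes on their head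
def pvGo (prefixes : List String) (family_dict : PySem.Dict String Int) : PySem.Dict String Int :=
  match prefixes with
  | [] => family_dict
  | family_name :: t =>
    let remaining := (family_name :: t).filter (fun p => !(p == family_name))
    pvGo remaining
      (family_dict.insert family_name
        (((family_name :: t).length : Int) - (remaining.length : Int)))
termination_by prefixes.length
decreasing_by
  simp only [List.filter_cons, beq_self_eq_true, Bool.not_true]
  exact Nat.lt_succ_of_le (List.length_filter_le _ _)

def count_proteins_alt (proteins : List String) : List (String × Int) :=
  (pvGo (proteins.map pvFam) (PySem.Dict.empty : PySem.Dict String Int)).items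

-- ===== PRECONDITION & SPEC =====
def Spec_count_proteins (proteins : List String) (out : List (String × Int)) : Prop := out = count_proteins_alt proteins
instance (proteins : List String) (out : List (String × Int)) : Decidable (Spec_count_proteins proteins out) := by unfold Spec_count_proteins; infer_instance

-- ===== CLAIM (what is proved, stated in full; the proofs are below) =====
def Claim_equal_count_proteins : Prop := ∀ (proteins : List String), Dom_count_proteins proteins → Spec_count_proteins proteins (count_proteins proteins)

-- ===== LEMMAS AND PROOFS =====

-- A's try/except step is the getD-based counting step
theorem pvStepA_eq :
    (fun (d : PySem.Dict String Int) (x : String) =>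
      match d.get? x with
      | some v => d.insert x (v + 1)
      | none   => d.insert x 1)
    = fun (d : PySem.Dict String Int) (x : String) => d.insert x (d.getD x 0 + 1) := by
  funext d x
  cases h : d.get? x with
  | none => simp [PySem.Dict.getD_of_get?_eq_none d 0 h]
  | some v => simp [PySem.Dict.getD_of_get?_eq_some d 0 h]

-- A's items: the distinct keys in first-occurrence order, each with its total count
theorem pvA_items (l : List String) :
    (l.foldl (fun d x =>
        match d.get? x with
        | some v => d.insert x (v + 1)
        | none   => d.insert x 1) (PySem.Dict.empty : PySem.Dict String Int)).items
    = (PySem.Set.ofList l).map (fun k => (k, (l.count k : Int))) := by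
  rw [pvStepA_eq, PySem.Dict.foldl_insert_getD_add_one_eq_counter, PySem.Dict.items_counter]

-- removing all copies of x from the tail is discarding x from the set of the tail
theorem pvOfList_filter (x : String) (l : List String) :
    PySem.Set.ofList (l.filter (fun p => !(p == x)))
      = PySem.Set.discard (PySem.Set.ofList l) x := by
  induction l with
  | nil => rfl
  | cons y t ih =>
    by_cases h : y = x
    · subst h
      simp [PySem.Set.ofList_cons, PySem.Set.discard, ih, List.filter_filter]
    · simp only [List.filter_cons, h, not_false_eq_true, Bool.not_eq_true',
        beq_eq_false_iff_ne, ne_eq, if_pos, PySem.Set.ofList_cons, ih]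
      simp [PySem.Set.discard, h, List.filter_filter, Bool.and_comm]

-- dropped length = count of the partition pivot
theorem pvCount_length (x : String) (l : List String) :
    ((l.length : Int) - ((l.filter (fun p => !(p == x))).length : Int))
      = (l.count x : Int) := by
  have h1 : l.countP (fun p => !(p == x)) = (l.filter (fun p => !(p == x))).length :=
    List.countP_eq_length_filter
  have h2 : l.count x = l.countP (fun p => p == x) := rfl
  have h3 : l.length = l.countP (fun p => p == x) + l.countP (fun p => !(p == x)) := by
    simpa using List.length_eq_countP_add_countP (l := l) (p := fun p => p == x)
  omega

-- the partition loop, from a dict containing none of the remaining keys, appends each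
-- distinct remaining key (first-occurrence order) with its count
theorem pvGo_items (n : ℕ) : ∀ (l : List String) (d : PySem.Dict String Int),
    l.length ≤ n → (∀ k ∈ l, d.contains k = false) →
    (pvGo l d).items
      = d.items ++ (PySem.Set.ofList l).map (fun k => (k, (l.count k : Int))) := by
  induction n with
  | zero =>
    intro l d hlen _
    have : l = [] := List.eq_nil_of_length_eq_zero (Nat.le_zero.mp hlen)
    subst this; simp [pvGo]
  | succ n ih =>
    intro l d hlen hfresh
    cases l with
    | nil => simp [pvGo]
    | cons x t =>
      rw [pvGo]
      have hx : d.contains x = false := hfresh x (List.mem_cons_self ..)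
      set r := (x :: t).filter (fun p => !(p == x)) with hr
      have hrt : r = t.filter (fun p => !(p == x)) := by
        simp [hr]
      have hrlen : r.length ≤ n := by
        rw [hrt]
        exact Nat.le_of_lt_succ (Nat.lt_succ_of_le
          (Nat.le_trans (List.length_filter_le _ _) (Nat.le_of_succ_le_succ hlen)))
      set c : Int := (((x :: t).length : Int) - (r.length : Int)) with hc
      have hfresh' : ∀ k ∈ r, (d.insert x c).contains k = false := by
        intro k hk
        have hkne : ¬ (k = x) := by
          have := List.of_mem_filter hk
          simpa using this
        have hkmem : k ∈ x :: t := List.mem_of_mem_filter hk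
        rw [PySem.Dict.contains_insert]
        simp [hkne, hfresh k hkmem]
      rw [ih r (d.insert x c) hrlen hfresh',
        PySem.Dict.items_insert_of_not_contains _ _ hx]
      have hset : PySem.Set.ofList (x :: t) = x :: PySem.Set.ofList r := by
        rw [PySem.Set.ofList_cons, hrt, pvOfList_filter]
      have hcv : c = ((x :: t).count x : Int) := by
        rw [hc, hr]; exact pvCount_length x (x :: t)
      have hmap : (PySem.Set.ofList r).map (fun k => (k, (r.count k : Int)))
          = (PySem.Set.ofList r).map (fun k => (k, ((x :: t).count k : Int))) := by
        apply List.map_congr_left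
        intro k hk
        have hk' : k ∈ r := by rwa [PySem.Set.mem_ofList] at hk
        rw [hr] at hk'
        have hkp : (!(k == x)) = true := (List.mem_filter.mp hk').2
        have : r.count k = (x :: t).count k := by
          rw [hr]; exact List.count_filter hkp
        rw [this]
      rw [hmap] at *
      rw [hset, List.map_cons, ← hcv]
      simp
-- ===== VERDICT (by name: the statement is the Claim_ definition above) =====
theorem count_proteins_spec : Claim_equal_count_proteins := by
  intro proteins _
  show count_proteins proteins = count_proteins_alt proteins
  have hA : count_proteins proteins
      = (PySem.Set.ofList (proteins.map pvFam)).map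
          (fun k => (k, ((proteins.map pvFam).count k : Int))) :=
    (congrArg PySem.Dict.items
      (List.foldl_map (f := pvFam)
        (g := fun (d : PySem.Dict String Int) (x : String) =>
          match d.get? x with
          | some v => d.insert x (v + 1)
          | none   => d.insert x 1)
        (l := proteins) (init := PySem.Dict.empty)).symm).trans
      (pvA_items (proteins.map pvFam))
  have hB := pvGo_items (proteins.map pvFam).length (proteins.map pvFam)
    (PySem.Dict.empty : PySem.Dict String Int) (Nat.le_refl _)
    (by intro k _; simp)
  rw [hA, count_proteins_alt, hB]
  rfl
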